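-- pv_equiv track=rewrite | github.com/Uniss1/1c-analytycs-ai-help | api/param_validator.py | _resolve_enum
-- ===== SOURCE A (Python) =====
-- import unicodedata
--
-- def _norm(s) -> str:
--     """Normalize for fuzzy comparison: strip, lowercase, drop punctuation, collapse spaces."""
--     s = str(s).strip().lower()
--     s = "".join(ch for ch in s if not unicodedata.category(ch).startswith("P"))
--     return " ".join(s.split())
--
-- def _resolve_enum(value, allowed: list[str]) -> tuple[str | None, list[str]]:
--     """Map value to a canonical allowed entry tolerating case/spacing/punctuation.
--
--     Returns (canonical, []) on unique match.
--     Returns (None, candidates) when ambiguous or no match (candidates may be empty).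
--     """
--     if not allowed:
--         return str(value), []
--     if value in allowed:
--         return value, []
--
--     v_norm = _norm(value)
--     # Case/punctuation-insensitive exact
--     for a in allowed:
--         if _norm(a) == v_norm:
--             return a, []
--
--     # Substring match, symmetric
--     subs: list[str] = []
--     for a in allowed:
--         a_norm = _norm(a)
--         if a_norm and (v_norm in a_norm or a_norm in v_norm):
--             subs.append(a)
--     if len(subs) == 1:
--         return subs[0], []
--     if len(subs) > 1:
--         return None, subs[:5]
--     return None, []
-- ===== SOURCE B (Python) =====
-- import unicodedata
--
-- def _norm(s) -> str:
--     """Normalize for fuzzy comparison: strip, lowercase, drop punctuation, collapse spaces."""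
--     s = str(s).strip().lower()
--     s = "".join(ch for ch in s if not unicodedata.category(ch).startswith("P"))
--     return " ".join(s.split())
--
-- def _resolve_enum(value, allowed: list[str]) -> tuple[str | None, list[str]]:
--     """Single pass: normalize each entry once; exact normalized hit returns at once,
--     otherwise collect symmetric-substring candidates along the way."""
--     if not allowed:
--         return str(value), []
--     if value in allowed:
--         return value, []
--
--     v_norm = _norm(value)
--     subs: list[str] = []
--     for a in allowed:
--         a_norm = _norm(a)
--         if a_norm == v_norm:
--             return a, []
--         if a_norm and (v_norm in a_norm or a_norm in v_norm):
--             subs.append(a)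
--     if len(subs) == 1:
--         return subs[0], []
--     if len(subs) > 1:
--         return None, subs[:5]
--     return None, []
-- ===== Notes on version B (the rewrite author's own statement) =====
-- stated objective: simpler
-- what changed: Replaces A's two separate scans (one for a normalized-exact match, then a second re-normalizing every entry for substring candidates) with a single pass that normalizes each entry once, returning immediately on an exact normalized hit and collecting substring candidates along the way.
import Mathlib
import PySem

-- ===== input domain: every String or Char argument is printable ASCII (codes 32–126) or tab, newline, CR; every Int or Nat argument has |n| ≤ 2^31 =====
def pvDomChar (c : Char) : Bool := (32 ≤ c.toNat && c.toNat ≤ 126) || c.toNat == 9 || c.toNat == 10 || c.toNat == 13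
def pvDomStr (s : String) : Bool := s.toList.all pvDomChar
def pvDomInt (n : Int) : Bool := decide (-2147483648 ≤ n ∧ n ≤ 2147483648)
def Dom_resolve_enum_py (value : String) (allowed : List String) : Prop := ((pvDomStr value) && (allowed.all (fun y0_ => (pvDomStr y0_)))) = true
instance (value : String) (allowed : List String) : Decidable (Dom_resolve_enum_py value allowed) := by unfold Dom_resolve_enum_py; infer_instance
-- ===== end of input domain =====

-- B merges A's two scans over `allowed` into one pass that normalizes each entry once (objective: simpler).


-- ===== PORT A =====
-- Unicode category 'P*' restricted to the ASCII domain (exact there: $+<=>^`|~ are category S, not P)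
def pvIsPunct (c : Char) : Bool :=
  c ∈ ['!', '"', '#', '%', '&', '\'', '(', ')', '*', ',', '-', '.', '/',
       ':', ';', '?', '@', '[', '\\', ']', '_', '{', '}']

-- _norm: strip, lowercase, drop punctuation, collapse whitespace (on List Char)
def normC (s : List Char) : List Char :=
  let s1 := PySem.Chars.lower (PySem.Chars.strip s)
  let s2 := s1.filter (fun c => !(pvIsPunct c))
  PySem.Chars.join [' '] (PySem.Chars.split₀ s2)

def resolve_enum_py (value : String) (allowed : List String) : Option String × List String :=
  if allowed = [] then (some value, [])
  else if value ∈ allowed then (some value, [])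
  else
    let vn := normC value.toList
    -- first loop: case/punctuation-insensitive exact match
    match allowed.find? (fun a => normC a.toList == vn) with
    | some a => (some a, [])
    | none =>
      -- second loop: symmetric substring candidates
      let subs := allowed.foldl (fun subs a =>
          let an := normC a.toList
          if an ≠ [] ∧ (PySem.Chars.isIn vn an ∨ PySem.Chars.isIn an vn)
          then subs ++ [a] else subs) ([] : List String)
      if subs.length = 1 then (PySem.List.pyGet? subs 0, [])
      else if 1 < subs.length then (none, PySem.List.slice subs none (some 5))
      else (none, [])

-- ===== PORT B =====
def resolveFinish (subs : List String) : Option String × List String :=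
  if subs.length = 1 then (PySem.List.pyGet? subs 0, [])
  else if 1 < subs.length then (none, PySem.List.slice subs none (some 5))
  else (none, [])

-- single pass: exact normalized hit returns at once, else collect substring candidates
def resolveLoop (vn : List Char) (l : List String) (subs : List String) :
    Option String × List String :=
  match l with
  | [] => resolveFinish subs
  | a :: rest =>
    let an := normC a.toList
    if an = vn then (some a, [])
    else if an ≠ [] ∧ (PySem.Chars.isIn vn an ∨ PySem.Chars.isIn an vn)
    then resolveLoop vn rest (subs ++ [a])
    else resolveLoop vn rest subs

def resolve_enum_py_alt (value : String) (allowed : List String) : Option String × List String :=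
  if allowed = [] then (some value, [])
  else if value ∈ allowed then (some value, [])
  else resolveLoop (normC value.toList) allowed []

-- ===== PRECONDITION & SPEC =====
def Spec_resolve_enum_py (value : String) (allowed : List String) (out : Option String × List String) : Prop := out = resolve_enum_py_alt value allowed
instance (value : String) (allowed : List String) (out : Option String × List String) : Decidable (Spec_resolve_enum_py value allowed out) := by unfold Spec_resolve_enum_py; infer_instance

-- ===== CLAIM (what is proved, stated in full; the proofs are below) =====
def Claim_equal_resolve_enum_py : Prop := ∀ (value : String) (allowed : List String), Dom_resolve_enum_py value allowed → Spec_resolve_enum_py value allowed (resolve_enum_py value allowed)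

-- ===== LEMMAS AND PROOFS =====

-- the single pass equals "find the first exact normalized match; if none, fold up the candidates and resolve"
theorem resolveLoop_eq (vn : List Char) (l : List String) (subs : List String) :
    resolveLoop vn l subs =
      match l.find? (fun a => normC a.toList == vn) with
      | some a => (some a, [])
      | none => resolveFinish (l.foldl (fun subs a =>
          let an := normC a.toList
          if an ≠ [] ∧ (PySem.Chars.isIn vn an ∨ PySem.Chars.isIn an vn)
          then subs ++ [a] else subs) subs) := by
  induction l generalizing subs with
  | nil => simp [resolveLoop]
  | cons a rest ih =>
    by_cases h : normC a.toList = vn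
    · simp [resolveLoop, List.find?, h]
    · simp only [resolveLoop, List.find?, List.foldl_cons, h, if_false]
      rw [show (normC a.toList == vn) = false by simpa using h]
      split_ifs with h2 <;> simp [ih]

theorem resolve_enum_py_spec : Claim_equal_resolve_enum_py := by
  intro value allowed _
  unfold Spec_resolve_enum_py resolve_enum_py resolve_enum_py_alt
  by_cases h1 : allowed = []
  · simp [h1]
  · by_cases h2 : value ∈ allowed
    · simp [h1, h2]
    · simp only [h1, h2, if_false]
      rw [resolveLoop_eq]
      rfl
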